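-- pv_equiv track=rewrite | github.com/rosie-s/courses | Udacity/02_IntroToComputerScience/Code/Lesson3/ProblemSet.py | antisymmetric
-- ===== SOURCE A (Python) =====
-- def antisymmetric(check_list):
--     n = len(check_list)
--     # Check if it's a square
--     for row in check_list:
--         if len(row) != n:
--             return False
--     # Check if it's antisymmetric:
--     for i in range(n):
--         for j in range(n):
--             if check_list[i][j] != -check_list[j][i]:
--                 return False
--     return True
-- ===== SOURCE B (Python) =====
-- def antisymmetric(check_list):
--     n = len(check_list)
--     # Check if it's a square (same guard as the spec: every row must have length n)
--     for row in check_list: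
--         if len(row) != n:
--             return False
--     # Antisymmetry as a whole-matrix identity: M == -M^T
--     return check_list == [[-x for x in col] for col in zip(*check_list)]
-- ===== Notes on version B (the rewrite author's own statement) =====
-- stated objective: idiomatic
-- what changed: Replaces the nested index-by-index scan with the whole-matrix identity M == -M^T, built via zip(*M) transpose and negation.
import Mathlib
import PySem

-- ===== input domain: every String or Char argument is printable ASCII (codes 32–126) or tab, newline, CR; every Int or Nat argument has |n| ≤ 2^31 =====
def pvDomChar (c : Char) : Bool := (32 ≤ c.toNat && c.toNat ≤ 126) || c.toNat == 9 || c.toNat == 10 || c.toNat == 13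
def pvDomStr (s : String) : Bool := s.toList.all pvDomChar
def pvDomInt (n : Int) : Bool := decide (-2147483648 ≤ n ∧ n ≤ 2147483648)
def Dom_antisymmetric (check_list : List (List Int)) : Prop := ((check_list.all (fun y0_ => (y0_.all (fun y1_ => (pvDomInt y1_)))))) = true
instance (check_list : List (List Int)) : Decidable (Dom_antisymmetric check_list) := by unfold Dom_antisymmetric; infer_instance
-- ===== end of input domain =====

-- B expresses antisymmetry as the whole-matrix identity M == -M^T instead of A's nested cell-by-cell scan (objective: idiomatic).

-- ===== PORT A =====
-- literal port: square guard loop (early return False = .all), then the nested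
-- index loops; check_list[i][j] is PySem.List.pyGet? (always in range here since the matrix is square)
def antisymmetric (check_list : List (List Int)) : Bool :=
  let n := check_list.length
  if check_list.all (fun row => row.length == n) then
    (PySem.List.pyRange 0 (n : Int) 1).all (fun i =>
      (PySem.List.pyRange 0 (n : Int) 1).all (fun j =>
        !(((PySem.List.pyGet? check_list i).bind (fun r => PySem.List.pyGet? r j)) !=
          (((PySem.List.pyGet? check_list j).bind (fun r => PySem.List.pyGet? r i)).map (fun x => -x)))))
  else false

-- ===== PORT B =====
-- zipCols is the port of zip(*rows): stops at the shortest row; fuel = length of the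
-- first row bounds the recursion (zip's output is never longer than any row)
def zipCols : Nat → List (List Int) → List (List Int)
  | 0, _ => []
  | k+1, rows =>
    if rows.any (fun r => r.isEmpty) then []
    else (rows.map (fun r => r.headD 0)) :: zipCols k (rows.map (fun r => r.tail))

def zipStar (rows : List (List Int)) : List (List Int) :=
  match rows with
  | [] => []
  | r :: rest => zipCols r.length (r :: rest)

def antisymmetric_alt (check_list : List (List Int)) : Bool :=
  let n := check_list.length
  if check_list.all (fun row => row.length == n) then
    check_list == (zipStar check_list).map (fun col => col.map (fun x => -x))
  else false

-- ===== PRECONDITION & SPEC =====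
def Spec_antisymmetric (check_list : List (List Int)) (out : Bool) : Prop := out = antisymmetric_alt check_list
instance (check_list : List (List Int)) (out : Bool) : Decidable (Spec_antisymmetric check_list out) := by unfold Spec_antisymmetric; infer_instance

-- ===== CLAIM (what is proved, stated in full; the proofs are below) =====
def Claim_equal_antisymmetric : Prop := ∀ (check_list : List (List Int)), Dom_antisymmetric check_list → Spec_antisymmetric check_list (antisymmetric check_list)

-- ===== LEMMAS AND PROOFS =====

-- characterization of zipCols on a rectangular block
lemma zipCols_char (k : Nat) : ∀ (rows : List (List Int)),
    (∀ r ∈ rows, r.length = k) →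
    zipCols k rows = (List.range k).map (fun j => rows.map (fun r => r.getD j 0)) := by
  induction k with
  | zero => intro rows _; simp [zipCols]
  | succ k ih =>
    intro rows h
    have hne : rows.any (fun r => r.isEmpty) = false := by
      simp only [List.any_eq_false]
      intro r hr
      have hl := h r hr
      cases r with
      | nil => simp at hl
      | cons a t => simp
    have htails : ∀ r ∈ rows.map (fun r => r.tail), r.length = k := by
      intro r hr
      simp only [List.mem_map] at hr
      obtain ⟨r', hr', rfl⟩ := hr
      have := h r' hr'
      simp [List.length_tail, this]
    rw [zipCols, hne]
    simp only [Bool.false_eq_true, if_false, ih _ htails, List.range_succ_eq_map]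
    simp only [List.map_cons, List.map_map]
    congr 1
    · apply List.map_congr_left
      intro r hr
      have hl := h r hr
      cases r with
      | nil => simp at hl
      | cons a t => simp
    · apply List.map_congr_left
      intro j _
      simp only [Function.comp_def]
      apply List.map_congr_left
      intro r hr
      have hl := h r hr
      cases r with
      | nil => simp at hl
      | cons a t => simp

lemma zipStar_char (cl : List (List Int)) (h : ∀ r ∈ cl, r.length = cl.length) :
    zipStar cl = (List.range cl.length).map (fun j => cl.map (fun r => r.getD j 0)) := by
  cases cl with
  | nil => simp [zipStar]
  | cons r rest =>
    have hr : r.length = (r :: rest).length := h r (List.mem_cons_self)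
    rw [zipStar, hr]
    exact zipCols_char _ _ h

-- the pointwise condition both programs test, as a Prop
lemma entry_some (cl : List (List Int)) (n : Nat) (hn : cl.length = n)
    (h : ∀ r ∈ cl, r.length = n) (i j : Nat) (hi : i < n) (hj : j < n) :
    (PySem.List.pyGet? cl (i : Int)).bind (fun r => PySem.List.pyGet? r (j : Int))
      = some ((cl.getD i []).getD j 0) := by
  have hi' : i < cl.length := by omega
  have hrow : cl[i].length = n := h _ (List.getElem_mem hi')
  have hj' : j < cl[i].length := by omega
  rw [PySem.List.pyGet?_natCast, List.getElem?_eq_getElem hi']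
  simp only [Option.bind_some]
  rw [PySem.List.pyGet?_natCast, List.getElem?_eq_getElem hj']
  rw [List.getD_eq_getElem cl [] hi', List.getD_eq_getElem _ _ hj']

-- ===== VERDICT =====
theorem antisymmetric_spec : Claim_equal_antisymmetric := by
  unfold Claim_equal_antisymmetric Spec_antisymmetric
  intro cl _
  unfold antisymmetric antisymmetric_alt
  simp only []
  by_cases hsq : cl.all (fun row => row.length == cl.length) = true
  · rw [if_pos hsq, if_pos hsq]
    have h : ∀ r ∈ cl, r.length = cl.length := by
      intro r hr
      have := List.all_eq_true.mp hsq r hr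
      simpa using this
    set n := cl.length with hn
    -- both sides reduce to the pointwise antisymmetry condition
    have key : ((PySem.List.pyRange 0 (n : Int) 1).all (fun i =>
        (PySem.List.pyRange 0 (n : Int) 1).all (fun j =>
          !(((PySem.List.pyGet? cl i).bind (fun r => PySem.List.pyGet? r j)) !=
            (((PySem.List.pyGet? cl j).bind (fun r => PySem.List.pyGet? r i)).map (fun x => -x)))))) = true
        ↔ ∀ i < n, ∀ j < n, (cl.getD i []).getD j 0 = -((cl.getD j []).getD i 0) := by
      simp only [List.all_eq_true]
      constructor
      · intro hall i hi j hj
        have hmi : (i : Int) ∈ PySem.List.pyRange 0 (n : Int) 1 := by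
          rw [PySem.List.mem_pyRange_one]; omega
        have hmj : (j : Int) ∈ PySem.List.pyRange 0 (n : Int) 1 := by
          rw [PySem.List.mem_pyRange_one]; omega
        have := hall _ hmi _ hmj
        rw [entry_some cl n rfl h i j hi hj, entry_some cl n rfl h j i hj hi] at this
        simpa using this
      · intro hpt i hmi j hmj
        rw [PySem.List.mem_pyRange_one] at hmi hmj
        obtain ⟨i', rfl⟩ : ∃ k : Nat, i = (k : Int) := ⟨i.toNat, by omega⟩
        obtain ⟨j', rfl⟩ : ∃ k : Nat, j = (k : Int) := ⟨j.toNat, by omega⟩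
        have hi' : i' < n := by exact_mod_cast hmi.2
        have hj' : j' < n := by exact_mod_cast hmj.2
        rw [entry_some cl n rfl h i' j' hi' hj', entry_some cl n rfl h j' i' hj' hi']
        simpa using hpt i' hi' j' hj'
    have keyB : (cl == (zipStar cl).map (fun col => col.map (fun x => -x))) = true
        ↔ ∀ i < n, ∀ j < n, (cl.getD i []).getD j 0 = -((cl.getD j []).getD i 0) := by
      rw [beq_iff_eq, zipStar_char cl h, List.map_map, ← hn]
      constructor
      · intro heq i hi j hj
        have hi' : i < cl.length := by omega
        have hj' : j < cl.length := by omega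
        have hcong := congrArg (fun l => (l.getD i []).getD j 0) heq
        simp only at hcong
        rw [hcong]
        have hiR : i < ((List.range n).map
            ((fun col => List.map (fun x => -x) col) ∘ fun j => cl.map (fun r => r.getD j 0))).length := by
          simpa using hi
        rw [List.getD_eq_getElem _ _ hiR, List.getElem_map, List.getElem_range]
        simp only [Function.comp_def]
        have hjm : j < (cl.map (fun r => r.getD i 0)).length := by simpa using hj'
        rw [List.getD_eq_getElem _ _ (by simpa using hj'), List.getElem_map, List.getElem_map]
        rw [List.getD_eq_getElem cl [] hj']
      · intro hpt
        apply List.ext_getElem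
        · simp [hn]
        · intro i hi hlen
          rw [List.getElem_map, List.getElem_range]
          apply List.ext_getElem
          · have : cl[i].length = n := h _ (List.getElem_mem hi)
            simpa using this
          · intro j hj hj2
            simp only [Function.comp_def] at hj2 ⊢
            rw [List.getElem_map, List.getElem_map]
            have hi' : i < n := by omega
            have hj' : j < cl.length := by simpa using hj2
            have hjn : j < n := by omega
            have hpti := hpt i hi' j hjn
            have hrj : i < cl[j].length := by
              have := h _ (List.getElem_mem hj'); omega
            rw [List.getD_eq_getElem cl [] hi, List.getD_eq_getElem cl [] hj'] at hpti
            rw [List.getD_eq_getElem _ _ hj] at hpti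
            rw [List.getD_eq_getElem _ _ hrj] at hpti ⊢
            exact hpti
      -- note: getElem_range / getElem_map align the mapped-range form with raw indices
    rw [show ((cl.length : Int)) = ((n : Nat) : Int) from rfl]
    cases hA : ((PySem.List.pyRange 0 ((n : Nat) : Int) 1).all _) with
    | true =>
      have := key.mp hA
      exact (keyB.mpr this).symm
    | false =>
      cases hB : (cl == (zipStar cl).map (fun col => col.map (fun x => -x))) with
      | true =>
        have := keyB.mp hB
        rw [key.mpr this] at hA
        exact absurd hA (by simp)
      | false => rfl
  · rw [if_neg hsq, if_neg hsq]
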